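-- pv_equiv track=rewrite | github.com/joncoop/advent-of-code | 2018/advent_02.py | has_matches
-- ===== SOURCE A (Python) =====
-- def has_matches(line, amount):
--     for letter in line:
--         count = 0
--         for letter2 in line:
--             if letter == letter2:
--                 count += 1
--
--         if count == amount:
--             return True
--
--     return False
-- ===== SOURCE B (Python) =====
-- def has_matches(line, amount):
--     counts = {}
--     for ch in line:
--         counts[ch] = counts.get(ch, 0) + 1
--     return amount in counts.values()
-- ===== Notes on version B (the rewrite author's own statement) =====
-- stated objective: faster
-- what changed: Replaced A's per-character rescans of the whole string (nested loops with early return) by a single pass building a dict of character counts, then one membership test over the dict's values.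
import Mathlib
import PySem

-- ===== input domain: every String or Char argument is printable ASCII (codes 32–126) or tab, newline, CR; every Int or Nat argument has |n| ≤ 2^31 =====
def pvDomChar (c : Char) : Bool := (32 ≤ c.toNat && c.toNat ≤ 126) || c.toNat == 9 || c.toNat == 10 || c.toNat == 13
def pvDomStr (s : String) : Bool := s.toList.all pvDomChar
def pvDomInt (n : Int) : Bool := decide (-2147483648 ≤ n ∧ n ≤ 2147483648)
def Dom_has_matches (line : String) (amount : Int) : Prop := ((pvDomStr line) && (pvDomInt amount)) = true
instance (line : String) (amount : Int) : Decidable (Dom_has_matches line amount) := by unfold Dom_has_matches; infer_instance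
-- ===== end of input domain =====

-- B builds the character counts in one pass over the line (a dict) and checks the
-- values for `amount`, instead of A's rescan of the whole line for every character: faster.


-- ===== PORT A =====
-- outer loop 'for letter in line: … if count == amount: return True';
-- the inner counting loop is the foldl over the whole line.
def hasMatchesLoopA (cs : List Char) (amount : Int) : List Char → Bool
  | [] => false
  | letter :: rest =>
    let count := cs.foldl (fun acc letter2 => if letter == letter2 then acc + 1 else acc) (0 : Int)
    if count == amount then true else hasMatchesLoopA cs amount rest

def has_matches (line : String) (amount : Int) : Bool :=
  hasMatchesLoopA line.toList amount line.toList

-- ===== PORT B =====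
def has_matches_alt (line : String) (amount : Int) : Bool :=
  let counts := line.toList.foldl (fun d ch => d.insert ch (d.getD ch 0 + 1)) PySem.Dict.empty
  counts.values.contains amount

-- ===== PRECONDITION & SPEC =====
def Spec_has_matches (line : String) (amount : Int) (out : Bool) : Prop := out = has_matches_alt line amount
instance (line : String) (amount : Int) (out : Bool) : Decidable (Spec_has_matches line amount out) := by unfold Spec_has_matches; infer_instance

-- ===== CLAIM (what is proved, stated in full; the proofs are below) =====
def Claim_equal_has_matches : Prop := ∀ (line : String) (amount : Int), Dom_has_matches line amount → Spec_has_matches line amount (has_matches line amount)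

-- ===== LEMMAS AND PROOFS =====

theorem loopA_eq_any (cs : List Char) (amount : Int) (l : List Char) :
    hasMatchesLoopA cs amount l = l.any (fun c => (cs.count c : Int) == amount) := by
  induction l with
  | nil => rfl
  | cons c rest ih =>
    have hc : (fun (acc : Int) (c2 : Char) => if c == c2 then acc + 1 else acc)
        = fun acc c2 => if c2 == c then acc + 1 else acc := by
      funext a c2; rw [BEq.comm]
    simp only [hasMatchesLoopA, hc, PySem.List.foldl_beq_add_one, zero_add, ih, List.any_cons]
    by_cases h : ((cs.count c : Int) == amount) = true <;> simp [h]

theorem alt_eq_any (line : String) (amount : Int) :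
    has_matches_alt line amount
      = line.toList.any (fun c => (line.toList.count c : Int) == amount) := by
  rw [Bool.eq_iff_iff]
  simp only [has_matches_alt, PySem.Dict.foldl_insert_getD_add_one_eq_counter,
    PySem.Dict.values_eq_map_keys _ (PySem.Dict.nodup_keys_counter _) (0 : Int),
    PySem.Dict.keys_counter, PySem.Dict.getD_counter,
    List.contains_iff_exists_mem_beq, List.any_eq_true, List.mem_map]
  constructor
  · rintro ⟨v, ⟨k, hk, rfl⟩, hb⟩
    exact ⟨k, (PySem.Set.mem_ofList _ _).1 hk, by rw [BEq.comm]; exact hb⟩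
  · rintro ⟨c, hc, hb⟩
    exact ⟨(line.toList.count c : Int), ⟨c, (PySem.Set.mem_ofList _ _).2 hc, rfl⟩, by rw [BEq.comm]; exact hb⟩

-- ===== VERDICT (by name: the statement is the Claim_ definition above) =====
theorem has_matches_spec : Claim_equal_has_matches := by
  intro line amount _
  unfold Spec_has_matches
  rw [has_matches, loopA_eq_any, alt_eq_any]
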